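-- pv_equiv track=rewrite | github.com/sachertort/AI-G16 | src/evaluation.py | preparee4evaluation
-- ===== SOURCE A (Python) =====
-- EMOTIONS = ["anger", "disgust", "fear", "joy", "sadness", "surprise"]
--
-- def preparee4evaluation(gold_pairs, pred_pairs):
--     gold4eval = []
--     pred4eval = []
--     for gold, pred in zip(gold_pairs, pred_pairs):
--         used = []
--         intersection = set(gold) & set(pred)
--         for gold_pair in gold:
--             gold4eval.append(gold_pair[2])
--             flag = False
--             if gold_pair in list(intersection):
--                 pred4eval.append(gold_pair[2])
--                 flag = True
--                 used.append(pred.index(gold_pair))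
--             else:
--                 for emotion in EMOTIONS:
--                     if (gold_pair[0], gold_pair[1], emotion) in pred:
--                         pred4eval.append(emotion)
--                         flag = True
--                         used.append(pred.index((gold_pair[0], gold_pair[1], emotion)))
--                         break
--                 if not flag:
--                     pred4eval.append("neutral")
--         for i, pred_pair in enumerate(pred):
--             if i not in used:
--                 pred4eval.append(pred_pair[2])
--                 gold4eval.append("neutral")
--     return gold4eval, pred4eval
-- ===== SOURCE B (Python) =====
-- EMOTIONS = ["anger", "disgust", "fear", "joy", "sadness", "surprise"]
-- RANK = {e: r for r, e in enumerate(EMOTIONS)}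
--
-- def preparee4evaluation(gold_pairs, pred_pairs):
--     gold4eval = []
--     pred4eval = []
--     for gold, pred in zip(gold_pairs, pred_pairs):
--         # group pred by span: (a, b) -> {label: first index in pred}
--         spans = {}
--         for i, (a, b, lab) in enumerate(pred):
--             slot = spans.setdefault((a, b), {})
--             if lab not in slot:
--                 slot[lab] = i
--         used = set()
--         matched = []
--         for a, b, lab in gold:
--             slot = spans.get((a, b), {})
--             if lab in slot:
--                 matched.append(lab)
--                 used.add(slot[lab])
--             else:
--                 best = None
--                 for e in slot:
--                     r = RANK.get(e)
--                     if r is not None and (best is None or r < best):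
--                         best = r
--                 if best is None:
--                     matched.append("neutral")
--                 else:
--                     choice = EMOTIONS[best]
--                     matched.append(choice)
--                     used.add(slot[choice])
--         leftovers = [t[2] for i, t in enumerate(pred) if i not in used]
--         gold4eval += [t[2] for t in gold] + ["neutral"] * len(leftovers)
--         pred4eval += matched + leftovers
--     return gold4eval, pred4eval
-- ===== Notes on version B (the rewrite author's own statement) =====
-- stated objective: faster
-- what changed: B groups pred by span into a nested dict (span -> label -> first index) in one pass, resolves each gold triple by a slot lookup plus a minimum-rank scan over the slot's labels (instead of A's scan of pred per emotion with repeated .index calls), and assembles the output in staged blocks (gold labels, matched labels, leftover pred labels) instead of A's interleaved appends.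
import Mathlib
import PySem

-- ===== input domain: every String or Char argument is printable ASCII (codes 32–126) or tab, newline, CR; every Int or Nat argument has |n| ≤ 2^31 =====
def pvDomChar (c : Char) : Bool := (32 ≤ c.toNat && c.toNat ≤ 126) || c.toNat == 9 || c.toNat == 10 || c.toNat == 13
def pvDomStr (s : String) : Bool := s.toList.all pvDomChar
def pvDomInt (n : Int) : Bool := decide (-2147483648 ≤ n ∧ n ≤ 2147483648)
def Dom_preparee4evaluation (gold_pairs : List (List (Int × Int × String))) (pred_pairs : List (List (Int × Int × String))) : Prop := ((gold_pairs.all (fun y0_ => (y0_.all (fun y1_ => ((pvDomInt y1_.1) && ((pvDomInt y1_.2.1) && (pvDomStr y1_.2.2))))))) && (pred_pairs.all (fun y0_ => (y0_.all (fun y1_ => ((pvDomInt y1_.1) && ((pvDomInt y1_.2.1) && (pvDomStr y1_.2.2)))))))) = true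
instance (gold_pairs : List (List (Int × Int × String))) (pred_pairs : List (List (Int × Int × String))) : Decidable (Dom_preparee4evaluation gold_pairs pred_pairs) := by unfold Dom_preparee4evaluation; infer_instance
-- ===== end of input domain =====

-- B groups pred by span into a nested dict (span -> label -> first index) in one pass, resolves each
-- gold triple by a slot lookup plus a minimum-rank scan over the slot's labels instead of A's
-- per-emotion scans of pred with repeated .index calls, and assembles the output in staged blocks
-- instead of A's interleaved appends (faster).

abbrev pvTriple := Int × Int × String

-- the module constant EMOTIONS (shared by both sources)
def pvEMOTIONS : List String := ["anger", "disgust", "fear", "joy", "sadness", "surprise"]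

-- ===== PORT A =====
-- A's inner 'for emotion in EMOTIONS: if (a,b,emotion) in pred: …; break' loop;
-- the 'none' fallback of the inner match is unreachable (membership was just checked).
def pvA_findEmotion (pred : List pvTriple) (a b : Int) : List String → Option (String × Int)
  | [] => none
  | e :: rest =>
    if (a, b, e) ∈ pred then
      match PySem.List.index? pred (a, b, e) with
      | some i => some (e, (i : Int))
      | none => none
    else pvA_findEmotion pred a b rest

-- A's loop body over gold_pair (state: gold4eval, pred4eval, used);
-- the 'none' fallback after the intersection test is unreachable (the triple is in pred).
def pvA_goldStep (inter : PySem.Set pvTriple) (pred : List pvTriple)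
    (st : List String × List String × List Int) (gp : pvTriple) :
    List String × List String × List Int :=
  let g4 := st.1 ++ [gp.2.2]
  if gp ∈ inter then
    match PySem.List.index? pred gp with
    | some i => (g4, st.2.1 ++ [gp.2.2], st.2.2 ++ [(i : Int)])
    | none => (g4, st.2.1 ++ [gp.2.2], st.2.2)
  else
    match pvA_findEmotion pred gp.1 gp.2.1 pvEMOTIONS with
    | some ei => (g4, st.2.1 ++ [ei.1], st.2.2 ++ [ei.2])
    | none => (g4, st.2.1 ++ ["neutral"], st.2.2)

-- A's trailing 'for i, pred_pair in enumerate(pred)' loop body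
def pvA_tailStep (used : List Int) (st : List String × List String) (ip : Int × pvTriple) :
    List String × List String :=
  if ip.1 ∈ used then st else (st.1 ++ ["neutral"], st.2 ++ [ip.2.2.2])

-- A's body for one (gold, pred) sentence
def pvA_sentence (st : List String × List String) (gold pred : List pvTriple) :
    List String × List String :=
  let inter := PySem.Set.inter (PySem.Set.ofList gold) (PySem.Set.ofList pred)
  let s := gold.foldl (pvA_goldStep inter pred) (st.1, st.2, ([] : List Int))
  (PySem.List.enumerate pred).foldl (pvA_tailStep s.2.2) (s.1, s.2.1)

def preparee4evaluation (gold_pairs : List (List pvTriple)) (pred_pairs : List (List pvTriple)) :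
    List String × List String :=
  (gold_pairs.zip pred_pairs).foldl (fun st gp => pvA_sentence st gp.1 gp.2) ([], [])

-- ===== PORT B =====
-- B's module constant RANK = {e: r for r, e in enumerate(EMOTIONS)}
def pvRANK : PySem.Dict String Int :=
  (PySem.List.enumerate pvEMOTIONS).foldl (fun d it => d.insert it.2 it.1) PySem.Dict.empty

-- B's 'for i, (a, b, lab) in enumerate(pred): slot = spans.setdefault((a,b), {}); if lab not in slot: slot[lab] = i'
def pvB_buildSpans (pred : List pvTriple) : PySem.Dict (Int × Int) (PySem.Dict String Int) :=
  (PySem.List.enumerate pred).foldl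
    (fun d it =>
      let d1 := d.setdefault (it.2.1, it.2.2.1) PySem.Dict.empty
      let slot := (d1.get? (it.2.1, it.2.2.1)).getD PySem.Dict.empty
      if slot.contains it.2.2.2 then d1
      else d1.insert (it.2.1, it.2.2.1) (slot.insert it.2.2.2 it.1))
    PySem.Dict.empty

-- B's 'best = None; for e in slot: r = RANK.get(e); if r is not None and (best is None or r < best): best = r'
def pvB_best (keys : List String) : Option Int :=
  keys.foldl
    (fun best e =>
      match pvRANK.get? e with
      | some r =>
        match best with
        | none => some r
        | some m => if r < m then some r else some m
      | none => best)
    none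

-- B's loop body over gold (state: matched, used set);
-- the two trailing fallbacks are unreachable (best is a valid EMOTIONS index and its emotion a slot key).
def pvB_goldStep (spans : PySem.Dict (Int × Int) (PySem.Dict String Int))
    (st : List String × PySem.Set Int) (gp : pvTriple) : List String × PySem.Set Int :=
  let slot := (spans.get? (gp.1, gp.2.1)).getD PySem.Dict.empty
  match slot.get? gp.2.2 with
  | some j => (st.1 ++ [gp.2.2], st.2.add j)
  | none =>
    match pvB_best slot.keys with
    | none => (st.1 ++ ["neutral"], st.2)
    | some r =>
      match PySem.List.pyGet? pvEMOTIONS r with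
      | some c =>
        match slot.get? c with
        | some j => (st.1 ++ [c], st.2.add j)
        | none => (st.1 ++ [c], st.2)
      | none => (st.1 ++ ["neutral"], st.2)

-- B's body for one (gold, pred) sentence: staged blocks
def pvB_sentence (st : List String × List String) (gold pred : List pvTriple) :
    List String × List String :=
  let spans := pvB_buildSpans pred
  let mu := gold.foldl (pvB_goldStep spans) (([] : List String), (PySem.Set.empty : PySem.Set Int))
  let leftovers := ((PySem.List.enumerate pred).filter
      (fun ip => !(PySem.Set.contains mu.2 ip.1))).map (fun ip => ip.2.2.2)
  (st.1 ++ gold.map (fun t => t.2.2) ++ List.replicate leftovers.length "neutral",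
   st.2 ++ mu.1 ++ leftovers)

def preparee4evaluation_alt (gold_pairs : List (List pvTriple)) (pred_pairs : List (List pvTriple)) :
    List String × List String :=
  (gold_pairs.zip pred_pairs).foldl (fun st gp => pvB_sentence st gp.1 gp.2) ([], [])

-- ===== PRECONDITION & SPEC =====
def Spec_preparee4evaluation (gold_pairs : List (List (Int × Int × String))) (pred_pairs : List (List (Int × Int × String))) (out : List String × List String) : Prop := out = preparee4evaluation_alt gold_pairs pred_pairs
instance (gold_pairs : List (List (Int × Int × String))) (pred_pairs : List (List (Int × Int × String))) (out : List String × List String) : Decidable (Spec_preparee4evaluation gold_pairs pred_pairs out) := by unfold Spec_preparee4evaluation; infer_instance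

-- ===== CLAIM (what is proved, stated in full; the proofs are below) =====
def Claim_equal_preparee4evaluation : Prop := ∀ (gold_pairs : List (List (Int × Int × String))) (pred_pairs : List (List (Int × Int × String))), Dom_preparee4evaluation gold_pairs pred_pairs → Spec_preparee4evaluation gold_pairs pred_pairs (preparee4evaluation gold_pairs pred_pairs)

-- ===== LEMMAS AND PROOFS =====

-- the span dict looks up first indices: slot lookup = first index of the triple in pred
-- one build step, seen through the nested lookup
lemma pv_spans_step (d : PySem.Dict (Int × Int) (PySem.Dict String Int)) (k : Int) (x : pvTriple)
    (a b : Int) (e : String) :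
    ((((let d1 := d.setdefault (x.1, x.2.1) PySem.Dict.empty
        let slot := (d1.get? (x.1, x.2.1)).getD PySem.Dict.empty
        if slot.contains x.2.2 then d1
        else d1.insert (x.1, x.2.1) (slot.insert x.2.2 k)) : PySem.Dict (Int × Int) (PySem.Dict String Int)).get? (a, b)).getD PySem.Dict.empty).get? e
      = if (a, b) = (x.1, x.2.1) ∧ e = x.2.2 ∧ (((d.get? (a, b)).getD PySem.Dict.empty).get? e = none)
        then some k else ((d.get? (a, b)).getD PySem.Dict.empty).get? e := by
  obtain ⟨xa, xb, xl⟩ := x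
  dsimp only
  have hslot : ((d.setdefault (xa, xb) PySem.Dict.empty).get? (xa, xb)).getD PySem.Dict.empty
      = (d.get? (xa, xb)).getD PySem.Dict.empty := by
    rw [PySem.Dict.get?_setdefault_self]; rfl
  by_cases hk : (a, b) = (xa, xb)
  · rw [Prod.mk.injEq] at hk
    obtain ⟨ha, hb⟩ := hk
    subst ha; subst hb
    rw [hslot]
    by_cases hc : ((d.get? (a, b)).getD PySem.Dict.empty).contains xl = true
    · have hs : (((d.get? (a, b)).getD PySem.Dict.empty).get? xl).isSome := by
        rw [← PySem.Dict.contains_eq_isSome_get?]; exact hc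
      obtain ⟨v, hv⟩ := Option.isSome_iff_exists.mp hs
      rw [if_pos hc, hslot]
      by_cases he : e = xl
      · subst he
        simp [hv]
      · simp [he]
    · have hn : ((d.get? (a, b)).getD PySem.Dict.empty).get? xl = none := by
        cases h : ((d.get? (a, b)).getD PySem.Dict.empty).get? xl with
        | none => rfl
        | some v => exact absurd (by rw [PySem.Dict.contains_eq_isSome_get?, h]; rfl) hc
      rw [if_neg hc, PySem.Dict.get?_insert_self]
      by_cases he : e = xl
      · subst he
        simp [PySem.Dict.get?_insert_self, hn]
      · simp [PySem.Dict.get?_insert_of_ne _ _ he, he]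
  · have hsd : (d.setdefault (xa, xb) PySem.Dict.empty).get? (a, b) = d.get? (a, b) :=
      PySem.Dict.get?_setdefault_of_ne d PySem.Dict.empty hk
    have hcond : ¬ ((a, b) = (xa, xb) ∧ e = xl ∧ (((d.get? (a, b)).getD PySem.Dict.empty).get? e = none)) := by
      intro h; exact hk h.1
    rw [if_neg hcond]
    split
    · rw [hsd]
    · rw [PySem.Dict.get?_insert_of_ne _ _ hk, hsd]

lemma pv_spans_aux (pred : List pvTriple) : ∀ (k : Int) (d : PySem.Dict (Int × Int) (PySem.Dict String Int)) (a b : Int) (e : String),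
    ((((PySem.List.enumerate pred k).foldl
        (fun d it =>
          let d1 := d.setdefault (it.2.1, it.2.2.1) PySem.Dict.empty
          let slot := (d1.get? (it.2.1, it.2.2.1)).getD PySem.Dict.empty
          if slot.contains it.2.2.2 then d1
          else d1.insert (it.2.1, it.2.2.1) (slot.insert it.2.2.2 it.1)) d).get? (a, b)).getD PySem.Dict.empty).get? e
      = ((((d.get? (a, b)).getD PySem.Dict.empty).get? e).orElse
          (fun _ => (PySem.List.index? pred (a, b, e)).map (fun n => (n : Int) + k))) := by
  induction pred with
  | nil =>
    intro k d a b e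
    cases h : ((d.get? (a, b)).getD PySem.Dict.empty).get? e <;>
      simp [PySem.List.enumerate_nil, PySem.List.index?_eq_idxOf?, h, Option.orElse]
  | cons x rest ih =>
    intro k d a b e
    rw [PySem.List.enumerate_cons]
    simp only [List.foldl_cons]
    rw [ih (k + 1)]
    rw [pv_spans_step d k x a b e]
    by_cases hcond : (a, b) = (x.1, x.2.1) ∧ e = x.2.2 ∧ (((d.get? (a, b)).getD PySem.Dict.empty).get? e = none)
    · obtain ⟨h1, h2, h3⟩ := hcond
      have hx : x = (a, b, e) := by
        obtain ⟨xa, xb, xl⟩ := x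
        simp only [Prod.mk.injEq] at h1 ⊢
        exact ⟨h1.1.symm, h1.2.symm, h2.symm⟩
      rw [if_pos ⟨h1, h2, h3⟩, hx, PySem.List.index?_cons_self, h3]
      simp [Option.orElse]
    · rw [if_neg hcond]
      cases hg : ((d.get? (a, b)).getD PySem.Dict.empty).get? e with
      | some v => simp [Option.orElse]
      | none =>
        have hne : x ≠ (a, b, e) := by
          intro hx
          apply hcond
          subst hx
          exact ⟨rfl, rfl, hg⟩
        rw [PySem.List.index?_cons_of_ne rest hne]
        cases hi : PySem.List.index? rest (a, b, e) with
        | none => simp [Option.orElse]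
        | some n =>
          simp [Option.orElse]
          ring

lemma pv_spans_get (pred : List pvTriple) (a b : Int) (e : String) :
    (((pvB_buildSpans pred).get? (a, b)).getD PySem.Dict.empty).get? e
      = (PySem.List.index? pred (a, b, e)).map (fun n => (n : Int)) := by
  unfold pvB_buildSpans
  rw [pv_spans_aux pred 0 PySem.Dict.empty a b e]
  cases h : PySem.List.index? pred (a, b, e) <;>
    simp [PySem.Dict.get?_empty, Option.orElse]

-- pvRANK as a literal dict
lemma pvRANK_eq : pvRANK = PySem.Dict.mk
    [("anger", 0), ("disgust", 1), ("fear", 2), ("joy", 3), ("sadness", 4), ("surprise", 5)] := by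
  rfl

lemma pv_rank_some (e : String) (r : Int) (h : pvRANK.get? e = some r) :
    0 ≤ r ∧ r < 6 ∧ PySem.List.pyGet? pvEMOTIONS r = some e := by
  rw [pvRANK_eq] at h
  simp only [PySem.Dict.get?_mk_cons] at h
  split_ifs at h with h1 h2 h3 h4 h5 h6
  · rw [Option.some.injEq] at h; rw [beq_iff_eq] at h1; subst h; subst h1; decide
  · rw [Option.some.injEq] at h; rw [beq_iff_eq] at h2; subst h; subst h2; decide
  · rw [Option.some.injEq] at h; rw [beq_iff_eq] at h3; subst h; subst h3; decide
  · rw [Option.some.injEq] at h; rw [beq_iff_eq] at h4; subst h; subst h4; decide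
  · rw [Option.some.injEq] at h; rw [beq_iff_eq] at h5; subst h; subst h5; decide
  · rw [Option.some.injEq] at h; rw [beq_iff_eq] at h6; subst h; subst h6; decide
  · exact absurd h (by simp [PySem.Dict.get?])

-- characterisation of B's minimum-rank scan
lemma pv_best_g_some (L : List Int) : ∀ (m : Int),
    L.foldl (fun b r => some (match b with | none => r | some m => if r < m then r else m)) (some m)
      = some (L.foldl min m) := by
  induction L with
  | nil => intro m; rfl
  | cons x L ih =>
    intro m
    simp only [List.foldl_cons]
    rw [ih]
    congr 2
    omega

lemma pv_best_eq_filterMap (K : List String) : ∀ (acc : Option Int),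
    K.foldl
      (fun best e =>
        match pvRANK.get? e with
        | some r =>
          match best with
          | none => some r
          | some m => if r < m then some r else some m
        | none => best) acc
    = (K.filterMap (fun e => pvRANK.get? e)).foldl
        (fun b r => some (match b with | none => r | some m => if r < m then r else m)) acc := by
  induction K with
  | nil => intro acc; rfl
  | cons e K ih =>
    intro acc
    simp only [List.foldl_cons, List.filterMap_cons]
    cases hr : pvRANK.get? e with
    | none => exact ih acc
    | some r =>
      simp only [List.foldl_cons]
      rw [ih]
      congr 1
      cases acc with
      | none => rfl
      | some m => dsimp only; split_ifs <;> rfl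

lemma pv_best_none (K : List String) (h : pvB_best K = none) :
    ∀ e ∈ K, pvRANK.get? e = none := by
  unfold pvB_best at h
  rw [pv_best_eq_filterMap] at h
  cases hL : K.filterMap (fun e => pvRANK.get? e) with
  | nil => exact fun e he => List.filterMap_eq_nil_iff.mp hL e he
  | cons x L =>
    rw [hL] at h
    simp only [List.foldl_cons] at h
    rw [pv_best_g_some] at h
    exact absurd h (by simp)

lemma pv_best_some (K : List String) (r : Int) (h : pvB_best K = some r) :
    (∃ e ∈ K, pvRANK.get? e = some r) ∧
    (∀ e ∈ K, ∀ r', pvRANK.get? e = some r' → r ≤ r') := by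
  unfold pvB_best at h
  rw [pv_best_eq_filterMap] at h
  cases hL : K.filterMap (fun e => pvRANK.get? e) with
  | nil => rw [hL] at h; exact absurd h (by simp)
  | cons x L =>
    rw [hL] at h
    simp only [List.foldl_cons] at h
    rw [pv_best_g_some, Option.some.injEq] at h
    have hmemr : r ∈ x :: L := by
      rcases PySem.List.foldl_min_mem L x with hc | hc
      · rw [← h, hc]; exact List.mem_cons_self ..
      · rw [← h]; exact List.mem_cons_of_mem _ hc
    constructor
    · have : r ∈ K.filterMap (fun e => pvRANK.get? e) := hL ▸ hmemr
      obtain ⟨e, he, hre⟩ := List.mem_filterMap.mp this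
      exact ⟨e, he, hre⟩
    · intro e he r' hr'
      have hr'mem : r' ∈ K.filterMap (fun e => pvRANK.get? e) :=
        List.mem_filterMap.mpr ⟨e, he, hr'⟩
      rw [hL] at hr'mem
      rcases List.mem_cons.mp hr'mem with hc | hc
      · subst hc; exact h ▸ (PySem.List.foldl_min_le L r').1
      · exact h ▸ (PySem.List.foldl_min_le L x).2 r' hc

-- A's emotion scan when nothing matches / at the first match
lemma pv_findEmotion_none (pred : List pvTriple) (a b : Int) :
    ∀ (es : List String), (∀ e ∈ es, (a, b, e) ∉ pred) → pvA_findEmotion pred a b es = none := by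
  intro es
  induction es with
  | nil => intro _; rfl
  | cons e rest ih =>
    intro h
    simp only [pvA_findEmotion, if_neg (h e (List.mem_cons_self ..))]
    exact ih (fun x hx => h x (List.mem_cons_of_mem _ hx))

lemma pv_findEmotion_first (pred : List pvTriple) (a b : Int) :
    ∀ (pre suf : List String) (c : String), (∀ e ∈ pre, (a, b, e) ∉ pred) → (a, b, c) ∈ pred →
    pvA_findEmotion pred a b (pre ++ c :: suf)
      = (PySem.List.index? pred (a, b, c)).map (fun n => (c, (n : Int))) := by
  intro pre
  induction pre with
  | nil =>
    intro suf c _ hc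
    cases hi : PySem.List.index? pred (a, b, c) <;>
      · rw [PySem.List.index?_eq_idxOf?] at hi
        simp [pvA_findEmotion, hc, hi]
  | cons p pre ih =>
    intro suf c h hc
    simp only [List.cons_append, pvA_findEmotion, if_neg (h p (List.mem_cons_self ..))]
    exact ih suf c (fun x hx => h x (List.mem_cons_of_mem _ hx)) hc

-- the per-gold-pair step: both sides append the same label and record the same index (if any)
lemma pv_step_core (gold0 pred : List pvTriple) (x : pvTriple) (hx : x ∈ gold0)
    (g4 p4 mB : List String) (uA : List Int) (uB : PySem.Set Int) :
    ∃ (s : String) (jo : Option Int),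
      pvA_goldStep (PySem.Set.inter (PySem.Set.ofList gold0) (PySem.Set.ofList pred)) pred (g4, p4, uA) x
        = (g4 ++ [x.2.2], p4 ++ [s], match jo with | some j => uA ++ [j] | none => uA) ∧
      pvB_goldStep (pvB_buildSpans pred) (mB, uB) x
        = (mB ++ [s], match jo with | some j => uB.add j | none => uB) := by
  obtain ⟨xa, xb, xl⟩ := x
  have hslot : ∀ e', (((pvB_buildSpans pred).get? (xa, xb)).getD PySem.Dict.empty).get? e'
      = (PySem.List.index? pred (xa, xb, e')).map (fun n => (n : Int)) :=
    fun e' => pv_spans_get pred xa xb e'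
  have hkeys : ∀ e', e' ∈ (((pvB_buildSpans pred).get? (xa, xb)).getD PySem.Dict.empty).keys ↔ (xa, xb, e') ∈ pred := by
    intro e'
    rw [← not_iff_not, ← PySem.Dict.get?_eq_none_iff_not_mem_keys, hslot e',
      ← PySem.List.index?_eq_none_iff pred (xa, xb, e')]
    cases PySem.List.index? pred (xa, xb, e') <;> simp
  by_cases hp : (xa, xb, xl) ∈ pred
  · -- exact match: both sides append the gold label and record the first index of the triple
    obtain ⟨n, hn⟩ := Option.isSome_iff_exists.mp ((PySem.List.index?_isSome_iff pred _).mpr hp)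
    have hinter : (xa, xb, xl) ∈ PySem.Set.inter (PySem.Set.ofList gold0) (PySem.Set.ofList pred) := by
      rw [PySem.Set.mem_inter]
      exact ⟨(PySem.Set.mem_ofList ..).mpr hx, (PySem.Set.mem_ofList ..).mpr hp⟩
    refine ⟨xl, some ((n : Int)), ?_, ?_⟩
    · have hn' := hn
      rw [PySem.List.index?_eq_idxOf?] at hn'
      simp [pvA_goldStep, hinter, hn']
    · have hg : (((pvB_buildSpans pred).get? (xa, xb)).getD PySem.Dict.empty).get? xl = some ((n : Int)) := by
        rw [hslot, hn]; rfl
      simp [pvB_goldStep, hg]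
  · -- no exact match
    have hinter : (xa, xb, xl) ∉ PySem.Set.inter (PySem.Set.ofList gold0) (PySem.Set.ofList pred) := by
      rw [PySem.Set.mem_inter]
      exact fun h => hp ((PySem.Set.mem_ofList ..).mp h.2)
    have hslotx : (((pvB_buildSpans pred).get? (xa, xb)).getD PySem.Dict.empty).get? xl = none := by
      rw [hslot, (PySem.List.index?_eq_none_iff pred _).mpr hp]; rfl
    cases hbest : pvB_best ((((pvB_buildSpans pred).get? (xa, xb)).getD PySem.Dict.empty).keys) with
    | none =>
      have hfind : pvA_findEmotion pred xa xb pvEMOTIONS = none := by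
        apply pv_findEmotion_none
        intro e he hmeme
        have hrn := pv_best_none _ hbest e ((hkeys e).mpr hmeme)
        fin_cases he <;> exact absurd hrn (by rw [pvRANK_eq]; simp [PySem.Dict.get?_mk_cons])
      refine ⟨"neutral", none, ?_, ?_⟩
      · simp [pvA_goldStep, hinter, hfind]
      · simp [pvB_goldStep, hslotx, hbest]
    | some r =>
      obtain ⟨⟨e₀, he₀K, he₀r⟩, hle⟩ := pv_best_some _ r hbest
      obtain ⟨hr0, hr6, hget⟩ := pv_rank_some e₀ r he₀r
      have hmem₀ : (xa, xb, e₀) ∈ pred := (hkeys e₀).mp he₀K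
      obtain ⟨n₀, hn₀⟩ := Option.isSome_iff_exists.mp ((PySem.List.index?_isSome_iff pred _).mpr hmem₀)
      have hg₀ : (((pvB_buildSpans pred).get? (xa, xb)).getD PySem.Dict.empty).get? e₀ = some ((n₀ : Int)) := by
        rw [hslot, hn₀]; rfl
      have hnotbefore : ∀ (e' : String) (r' : Int), pvRANK.get? e' = some r' → r' < r → (xa, xb, e') ∉ pred := by
        intro e' r' hr' hlt hmem'
        exact absurd (hle e' ((hkeys e').mpr hmem') r' hr') (by omega)
      have hfind : pvA_findEmotion pred xa xb pvEMOTIONS = some (e₀, ((n₀ : Int))) := by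
        obtain ⟨k, rfl⟩ := Int.eq_ofNat_of_zero_le hr0
        have hk6 : k < 6 := by exact_mod_cast hr6
        interval_cases k
        · have he : e₀ = "anger" := by
            rw [show PySem.List.pyGet? pvEMOTIONS ((0 : Nat) : Int) = some "anger" from rfl,
              Option.some.injEq] at hget
            exact hget.symm
          subst he
          rw [show pvEMOTIONS = [] ++ "anger" :: ["disgust", "fear", "joy", "sadness", "surprise"] from rfl,
            pv_findEmotion_first pred xa xb _ _ _ (by intro e he; simp at he) hmem₀, hn₀]
          rfl
        · have he : e₀ = "disgust" := by
            rw [show PySem.List.pyGet? pvEMOTIONS ((1 : Nat) : Int) = some "disgust" from rfl,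
              Option.some.injEq] at hget
            exact hget.symm
          subst he
          have hpre : ∀ e ∈ (["anger"] : List String), (xa, xb, e) ∉ pred := by
            intro e he
            fin_cases he
            · exact hnotbefore "anger" 0 rfl (by omega)
          rw [show pvEMOTIONS = ["anger"] ++ "disgust" :: ["fear", "joy", "sadness", "surprise"] from rfl,
            pv_findEmotion_first pred xa xb _ _ _ hpre hmem₀, hn₀]
          rfl
        · have he : e₀ = "fear" := by
            rw [show PySem.List.pyGet? pvEMOTIONS ((2 : Nat) : Int) = some "fear" from rfl,
              Option.some.injEq] at hget
            exact hget.symm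
          subst he
          have hpre : ∀ e ∈ (["anger", "disgust"] : List String), (xa, xb, e) ∉ pred := by
            intro e he
            fin_cases he
            · exact hnotbefore "anger" 0 rfl (by omega)
            · exact hnotbefore "disgust" 1 rfl (by omega)
          rw [show pvEMOTIONS = ["anger", "disgust"] ++ "fear" :: ["joy", "sadness", "surprise"] from rfl,
            pv_findEmotion_first pred xa xb _ _ _ hpre hmem₀, hn₀]
          rfl
        · have he : e₀ = "joy" := by
            rw [show PySem.List.pyGet? pvEMOTIONS ((3 : Nat) : Int) = some "joy" from rfl,
              Option.some.injEq] at hget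
            exact hget.symm
          subst he
          have hpre : ∀ e ∈ (["anger", "disgust", "fear"] : List String), (xa, xb, e) ∉ pred := by
            intro e he
            fin_cases he
            · exact hnotbefore "anger" 0 rfl (by omega)
            · exact hnotbefore "disgust" 1 rfl (by omega)
            · exact hnotbefore "fear" 2 rfl (by omega)
          rw [show pvEMOTIONS = ["anger", "disgust", "fear"] ++ "joy" :: ["sadness", "surprise"] from rfl,
            pv_findEmotion_first pred xa xb _ _ _ hpre hmem₀, hn₀]
          rfl
        · have he : e₀ = "sadness" := by
            rw [show PySem.List.pyGet? pvEMOTIONS ((4 : Nat) : Int) = some "sadness" from rfl,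
              Option.some.injEq] at hget
            exact hget.symm
          subst he
          have hpre : ∀ e ∈ (["anger", "disgust", "fear", "joy"] : List String), (xa, xb, e) ∉ pred := by
            intro e he
            fin_cases he
            · exact hnotbefore "anger" 0 rfl (by omega)
            · exact hnotbefore "disgust" 1 rfl (by omega)
            · exact hnotbefore "fear" 2 rfl (by omega)
            · exact hnotbefore "joy" 3 rfl (by omega)
          rw [show pvEMOTIONS = ["anger", "disgust", "fear", "joy"] ++ "sadness" :: ["surprise"] from rfl,
            pv_findEmotion_first pred xa xb _ _ _ hpre hmem₀, hn₀]
          rfl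
        · have he : e₀ = "surprise" := by
            rw [show PySem.List.pyGet? pvEMOTIONS ((5 : Nat) : Int) = some "surprise" from rfl,
              Option.some.injEq] at hget
            exact hget.symm
          subst he
          have hpre : ∀ e ∈ (["anger", "disgust", "fear", "joy", "sadness"] : List String), (xa, xb, e) ∉ pred := by
            intro e he
            fin_cases he
            · exact hnotbefore "anger" 0 rfl (by omega)
            · exact hnotbefore "disgust" 1 rfl (by omega)
            · exact hnotbefore "fear" 2 rfl (by omega)
            · exact hnotbefore "joy" 3 rfl (by omega)
            · exact hnotbefore "sadness" 4 rfl (by omega)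
          rw [show pvEMOTIONS = ["anger", "disgust", "fear", "joy", "sadness"] ++ "surprise" :: [] from rfl,
            pv_findEmotion_first pred xa xb _ _ _ hpre hmem₀, hn₀]
          rfl
      refine ⟨e₀, some ((n₀ : Int)), ?_, ?_⟩
      · simp [pvA_goldStep, hinter, hfind]
      · simp [pvB_goldStep, hslotx, hbest, hget, hg₀]

-- the two gold folds agree (A also appends the gold labels; matched labels and used indices coincide)
lemma pv_gold_fold (gold0 pred : List pvTriple) :
    ∀ (l : List pvTriple), (∀ x ∈ l, x ∈ gold0) →
    ∀ (g4 p4 mB : List String) (uA : List Int) (uB : PySem.Set Int), (∀ i, i ∈ uA ↔ i ∈ uB) →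
    (l.foldl (pvA_goldStep (PySem.Set.inter (PySem.Set.ofList gold0) (PySem.Set.ofList pred)) pred) (g4, p4, uA)).1
        = g4 ++ l.map (fun t => t.2.2) ∧
    (∃ ms : List String,
      (l.foldl (pvA_goldStep (PySem.Set.inter (PySem.Set.ofList gold0) (PySem.Set.ofList pred)) pred) (g4, p4, uA)).2.1
        = p4 ++ ms ∧
      (l.foldl (pvB_goldStep (pvB_buildSpans pred)) (mB, uB)).1 = mB ++ ms) ∧
    (∀ i, i ∈ (l.foldl (pvA_goldStep (PySem.Set.inter (PySem.Set.ofList gold0) (PySem.Set.ofList pred)) pred) (g4, p4, uA)).2.2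
        ↔ i ∈ (l.foldl (pvB_goldStep (pvB_buildSpans pred)) (mB, uB)).2) := by
  intro l
  induction l with
  | nil =>
    intro _ g4 p4 mB uA uB hinv
    exact ⟨by simp, ⟨[], by simp, by simp⟩, hinv⟩
  | cons x l ih =>
    intro hmem g4 p4 mB uA uB hinv
    obtain ⟨s, jo, hA, hB⟩ :=
      pv_step_core gold0 pred x (hmem x (List.mem_cons_self ..)) g4 p4 mB uA uB
    simp only [List.foldl_cons, hA, hB]
    have hinv' : ∀ i, i ∈ (match jo with | some j => uA ++ [j] | none => uA)
        ↔ i ∈ (match jo with | some j => uB.add j | none => uB) := by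
      cases jo with
      | none => exact hinv
      | some j => intro i; simp [List.mem_append, PySem.Set.mem_add, hinv i]
    obtain ⟨h1, ⟨ms, h2, h3⟩, h4⟩ :=
      ih (fun y hy => hmem y (List.mem_cons_of_mem _ hy)) (g4 ++ [x.2.2]) (p4 ++ [s]) (mB ++ [s]) _ _ hinv'
    exact ⟨by rw [h1]; simp, ⟨s :: ms, by rw [h2]; simp, by rw [h3]; simp⟩, h4⟩

-- A's trailing loop builds the staged blocks of B
lemma pv_tail_fold (uA : List Int) (uB : PySem.Set Int) (h : ∀ i, i ∈ uA ↔ i ∈ uB) :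
    ∀ (lst : List (Int × pvTriple)) (g p : List String),
    lst.foldl (pvA_tailStep uA) (g, p)
      = (g ++ List.replicate ((lst.filter (fun ip => !(PySem.Set.contains uB ip.1))).map (fun ip => ip.2.2.2)).length "neutral",
         p ++ (lst.filter (fun ip => !(PySem.Set.contains uB ip.1))).map (fun ip => ip.2.2.2)) := by
  intro lst
  induction lst with
  | nil => intro g p; simp
  | cons ip lst ih =>
    intro g p
    simp only [List.foldl_cons]
    by_cases hm : ip.1 ∈ uA
    · have hc : (!(PySem.Set.contains uB ip.1)) = false := by
        simp [PySem.Set.contains]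
        exact (h ip.1).mp hm
      rw [List.filter_cons_of_neg (by rw [hc]; exact Bool.false_ne_true)]
      rw [show pvA_tailStep uA (g, p) ip = (g, p) from by simp [pvA_tailStep, hm]]
      exact ih g p
    · have hc : (!(PySem.Set.contains uB ip.1)) = true := by
        simp [PySem.Set.contains]
        exact fun hcon => hm ((h ip.1).mpr hcon)
      rw [List.filter_cons_of_pos (by rw [hc])]
      rw [show pvA_tailStep uA (g, p) ip = (g ++ ["neutral"], p ++ [ip.2.2.2]) from by
        simp [pvA_tailStep, hm]]
      rw [ih]
      simp [List.replicate_succ]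

lemma pv_sentence_eq (st : List String × List String) (gold pred : List pvTriple) :
    pvA_sentence st gold pred = pvB_sentence st gold pred := by
  unfold pvA_sentence pvB_sentence
  dsimp only
  obtain ⟨h1, ⟨ms, h2, h3⟩, h4⟩ :=
    pv_gold_fold gold pred gold (fun _ h => h) st.1 st.2 [] [] PySem.Set.empty
      (fun i => by simp [PySem.Set.empty])
  rw [pv_tail_fold _ _ h4, h1, h2, h3]
  simp [List.append_assoc]

-- ===== VERDICT (by name: the statement is the Claim_ definition above) =====
theorem preparee4evaluation_spec : Claim_equal_preparee4evaluation := by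
  intro gold_pairs pred_pairs _
  unfold Spec_preparee4evaluation preparee4evaluation preparee4evaluation_alt
  congr 1
  funext st gp
  exact pv_sentence_eq st gp.1 gp.2
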